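-- pv_equiv track=rewrite | github.com/capstone-winners/lifi | Lifi/HistoryInterpreter.py | history_to_pretty_str
-- ===== SOURCE A (Python) =====
-- def history_to_pretty_str(history):
--     s = ""
--     count = 0
--     for index, entry in enumerate(history):
--         if index == 0:
--             continue
--
--         if entry != history[index - 1]:
--             prev = history[index - 1]
--             s += "\n{}\t{}".format(prev, count)
--
--             if entry == "blue":
--                 s+= "\n"
--             count = 0
--         else:
--             count += 1
--     return s
-- ===== SOURCE B (Python) =====
-- def _runs(history):
--     """Run-length encode: [(value, length), ...]."""
--     runs = []
--     i = 0
--     n = len(history)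
--     while i < n:
--         j = i + 1
--         while j < n and history[j] == history[i]:
--             j += 1
--         runs.append((history[i], j - i))
--         i = j
--     return runs
--
--
-- def history_to_pretty_str(history):
--     runs = _runs(history)
--     parts = []
--     for (v, n), (w, _m) in zip(runs, runs[1:]):
--         parts.append("\n{}\t{}".format(v, n - 1))
--         if w == "blue":
--             parts.append("\n")
--     return "".join(parts)
-- ===== Notes on version B (the rewrite author's own statement) =====
-- stated objective: alternative
-- what changed: Replaces A's single enumerate pass with prev-element lookups and a skip-first counter by a two-phase decomposition: run-length encode the history, then a second pass over adjacent run pairs emits '\n{value}\t{length-1}' per non-final run plus a newline before 'blue' runs.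
import Mathlib
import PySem

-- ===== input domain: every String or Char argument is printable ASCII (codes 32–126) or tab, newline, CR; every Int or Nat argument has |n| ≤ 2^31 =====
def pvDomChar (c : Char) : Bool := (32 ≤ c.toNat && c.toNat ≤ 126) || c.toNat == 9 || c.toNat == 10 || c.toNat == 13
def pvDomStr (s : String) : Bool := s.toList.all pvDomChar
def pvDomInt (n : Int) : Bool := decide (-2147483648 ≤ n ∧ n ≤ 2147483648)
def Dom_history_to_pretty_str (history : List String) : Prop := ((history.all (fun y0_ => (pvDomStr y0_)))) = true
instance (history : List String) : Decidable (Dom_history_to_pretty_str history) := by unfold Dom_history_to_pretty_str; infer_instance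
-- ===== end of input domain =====

-- B rewrites A's one-pass enumerate-with-lookback loop as run-length-encode followed by a
-- pass over adjacent run pairs (objective: alternative decomposition, same cost).

-- ===== PORT A =====
-- step of A's loop body; history[index-1] is ported as pyGetD (index ≥ 1 in that branch, so it is in range and exact)
def pvStepA (history : List String) (st : String × Int) (p : Int × String) : String × Int :=
  if p.1 == 0 then st
  else
    if p.2 ≠ PySem.List.pyGetD history (p.1 - 1) "" then
      let prev := PySem.List.pyGetD history (p.1 - 1) ""
      let s := st.1 ++ "\n" ++ prev ++ "\t" ++ PySem.Int.toStr st.2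
      let s := if p.2 == "blue" then s ++ "\n" else s
      (s, 0)
    else (st.1, st.2 + 1)

def history_to_pretty_str (history : List String) : String :=
  ((PySem.List.enumerate history 0).foldl (pvStepA history) ("", 0)).1

-- ===== PORT B =====
-- run-length encoding of the list (port of _runs from Source B)
def pvRunsOf : List String → List (String × Int)
  | [] => []
  | x :: xs =>
    (x, 1 + ((xs.takeWhile (fun y => y == x)).length : Int)) :: pvRunsOf (xs.dropWhile (fun y => y == x))
termination_by l => l.length
decreasing_by
  have := List.length_dropWhile_le (fun y => y == x) xs
  simpa using Nat.lt_succ_of_le this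

-- emission: loop over zip(runs, runs[1:]) accumulating parts (port of the loop in Source B)
def pvStepB (acc : String) (pq : (String × Int) × (String × Int)) : String :=
  (acc ++ ("\n" ++ pq.1.1 ++ "\t" ++ PySem.Int.toStr (pq.1.2 - 1)))
    ++ (if pq.2.1 == "blue" then "\n" else "")

def history_to_pretty_str_alt (history : List String) : String :=
  let runs := pvRunsOf history
  ((runs.zip runs.tail).foldl pvStepB "")

-- ===== PRECONDITION & SPEC =====
def Spec_history_to_pretty_str (history : List String) (out : String) : Prop := out = history_to_pretty_str_alt history
instance (history : List String) (out : String) : Decidable (Spec_history_to_pretty_str history out) := by unfold Spec_history_to_pretty_str; infer_instance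

-- ===== CLAIM (what is proved, stated in full; the proofs are below) =====
def Claim_equal_history_to_pretty_str : Prop := ∀ (history : List String), Dom_history_to_pretty_str history → Spec_history_to_pretty_str history (history_to_pretty_str history)

-- ===== LEMMAS AND PROOFS =====

-- recursive form of B's emission loop (proof helper)
def pvEmit : List (String × Int) → String
  | [] => ""
  | [_] => ""
  | (v, n) :: (w, m) :: rest =>
    ((("\n" ++ v ++ "\t" ++ PySem.Int.toStr (n - 1)) ++ (if w == "blue" then "\n" else ""))
      ++ pvEmit ((w, m) :: rest))

theorem pvFoldB_eq_emit (runs : List (String × Int)) : ∀ (acc : String),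
    (runs.zip runs.tail).foldl pvStepB acc = acc ++ pvEmit runs := by
  induction runs with
  | nil => intro acc; simp [pvEmit]
  | cons x rest ih =>
    intro acc
    cases rest with
    | nil => simp [pvEmit]
    | cons y rest₂ =>
      obtain ⟨v, n⟩ := x
      obtain ⟨w, m⟩ := y
      simp only [List.tail_cons, List.zip_cons_cons, List.foldl_cons]
      rw [show ((w, m) :: rest₂ : List (String × Int)).zip rest₂
            = ((w, m) :: rest₂).zip (((w, m) :: rest₂).tail) from rfl]
      rw [ih, pvEmit, pvStepB]
      simp [String.append_assoc]


theorem pvRunsOf_nil : pvRunsOf [] = [] := by rw [pvRunsOf.eq_def]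

theorem pvRunsOf_cons (x : String) (xs : List String) :
    pvRunsOf (x :: xs)
      = (x, 1 + ((xs.takeWhile (fun y => y == x)).length : Int))
          :: pvRunsOf (xs.dropWhile (fun y => y == x)) := by
  rw [pvRunsOf.eq_def]

-- functional form of A's loop after the first element: prev value and count carried explicitly
def pvFA : String → Int → List String → String
  | _, _, [] => ""
  | prev, c, e :: r =>
    if e ≠ prev then
      ((("\n" ++ prev ++ "\t" ++ PySem.Int.toStr c) ++ (if e == "blue" then "\n" else ""))
        ++ pvFA e 0 r)
    else pvFA prev (c + 1) r

theorem pvFA_eq_emit (r : List String) : ∀ (e : String) (c : Int),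
    pvFA e c r
      = pvEmit ((e, c + 1 + ((r.takeWhile (fun y => y == e)).length : Int))
                  :: pvRunsOf (r.dropWhile (fun y => y == e))) := by
  induction r with
  | nil => intro e c; simp [pvFA, pvRunsOf_nil, pvEmit]
  | cons x r₂ ih =>
    intro e c
    by_cases hx : x = e
    · subst hx
      simp only [pvFA, List.takeWhile_cons, List.dropWhile_cons, beq_self_eq_true, if_true,
        ne_eq, not_true_eq_false, if_false]
      rw [ih x (c + 1)]
      norm_num
      ring_nf
    · have hb : (x == e) = false := by simp [hx]
      simp only [pvFA, List.takeWhile_cons, List.dropWhile_cons, hb, Bool.false_eq_true,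
        reduceIte]
      rw [if_pos hx, pvRunsOf_cons, pvEmit, ih x 0]
      norm_num

theorem pvLoopA (t : List String) : ∀ (pre : List String) (p s : String) (c : Int),
    ((PySem.List.enumerate t ((pre.length : Int) + 1)).foldl (pvStepA (pre ++ p :: t)) (s, c)).1
      = s ++ pvFA p c t := by
  induction t with
  | nil => intro pre p s c; simp [PySem.List.enumerate, pvFA]
  | cons e r ih =>
    intro pre p s c
    rw [PySem.List.enumerate_cons, List.foldl_cons]
    have hz : ((((pre.length : Int) + 1) == 0) = false) := by
      simp only [beq_eq_false_iff_ne, ne_eq]; omega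
    have hprev : PySem.List.pyGetD (pre ++ p :: e :: r) ((pre.length : Int) + 1 - 1) "" = p := by
      have hidx : ((pre.length : Int) + 1 - 1) = (pre.length : Int) := by ring
      rw [hidx, PySem.List.pyGetD_natCast]
      simp [List.getD]
    have hhist : pre ++ p :: e :: r = (pre ++ [p]) ++ e :: r := by simp
    have hlen : ((pre.length : Int) + 1 + 1) = (((pre ++ [p]).length : Int) + 1) := by
      simp
    by_cases hep : e = p
    · subst hep
      have hstep : pvStepA (pre ++ e :: e :: r) (s, c) ((pre.length : Int) + 1, e) = (s, c + 1) := by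
        simp only [pvStepA, hz, Bool.false_eq_true, if_false, hprev, ne_eq,
          not_true_eq_false]
      rw [hstep, hlen, hhist, ih (pre ++ [e]) e s (c + 1)]
      simp [pvFA]
    · have hstep : pvStepA (pre ++ p :: e :: r) (s, c) ((pre.length : Int) + 1, e)
          = ((if e == "blue" then (s ++ "\n" ++ p ++ "\t" ++ PySem.Int.toStr c) ++ "\n"
              else s ++ "\n" ++ p ++ "\t" ++ PySem.Int.toStr c), 0) := by
        simp only [pvStepA, hz, Bool.false_eq_true, if_false, hprev, ne_eq]
        rw [if_pos hep]
      rw [hstep, hlen, hhist, ih (pre ++ [p]) e _ 0]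
      rw [pvFA, if_pos hep]
      by_cases hb : e = "blue" <;> simp [hb, String.append_assoc]

theorem pvA_eq_fA (history : List String) :
    history_to_pretty_str history
      = (match history with | [] => "" | h :: t => pvFA h 0 t) := by
  cases history with
  | nil => simp [history_to_pretty_str, PySem.List.enumerate]
  | cons h t =>
    unfold history_to_pretty_str
    rw [PySem.List.enumerate_cons, List.foldl_cons]
    have hstep : pvStepA (h :: t) (("", 0) : String × Int) (0, h) = ("", 0) := by
      simp [pvStepA]
    rw [hstep]
    have := pvLoopA t [] h "" 0
    simpa using this

-- ===== VERDICT (by name: the statement is the Claim_ definition above) =====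
theorem history_to_pretty_str_spec : Claim_equal_history_to_pretty_str := by
  intro history _
  unfold Spec_history_to_pretty_str
  show history_to_pretty_str history
      = ((pvRunsOf history).zip (pvRunsOf history).tail).foldl pvStepB ""
  rw [pvFoldB_eq_emit, pvA_eq_fA]
  cases history with
  | nil => simp [pvRunsOf_nil, pvEmit]
  | cons h t =>
    rw [pvRunsOf_cons]
    have := pvFA_eq_emit t h 0
    simpa using this
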